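-- pv_equiv track=rewrite | github.com/N21A/advent-of-code | _Season24/08 - Resonant Collinearity/Python/aoc2024_08_1.py | find_antinodes
-- ===== SOURCE A (Python) =====
-- def find_antinodes(antennas, width, height):
--     """
--     Determines all unique antinode locations caused by antenna pairs.
--         -> Returns a set of unique (x, y) coordinates representing antinode locations.
--     """
--     antinode_set = set()
--
--     for i, antenna1 in enumerate(antennas):
--         for j, antenna2 in enumerate(antennas):
--             # Avoid redundant pair evaluations
--             # Ensure only matching pairs are evaluated:
--             if i >= j or antenna1[2] != antenna2[2]:
--                 continue
--
--             dx = antenna2[0] - antenna1[0]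
--             dy = antenna2[1] - antenna1[1]
--
--             # Check for antinodes twice as far
--             antinode1 = (antenna1[0] - dx, antenna1[1] - dy)
--             antinode2 = (antenna2[0] + dx, antenna2[1] + dy)
--
--             for antinode in (antinode1, antinode2):
--                 x, y = antinode
--                 if 0 <= x < width and 0 <= y < height:
--                     antinode_set.add((x, y))
--
--     return antinode_set
-- ===== SOURCE B (Python) =====
-- def find_antinodes(antennas, width, height):
--     """Bucket the antennas by frequency in one pass (recording, for each
--     antenna, its slot in its bucket), then pair each antenna only with the
--     later members of its own bucket -- the all-pairs scan over antennas of
--     other frequencies disappears."""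
--     buckets = {}
--     slots = []
--     for x, y, f in antennas:
--         g = buckets.setdefault(f, [])
--         slots.append((x, y, f, len(g)))
--         g.append((x, y))
--     out = set()
--     for x1, y1, f, p in slots:
--         for x2, y2 in buckets[f][p + 1:]:
--             for q in ((2 * x1 - x2, 2 * y1 - y2), (2 * x2 - x1, 2 * y2 - y1)):
--                 if 0 <= q[0] < width and 0 <= q[1] < height:
--                     out.add(q)
--     return out
-- ===== Notes on version B (the rewrite author's own statement) =====
-- stated objective: alternative
-- what changed: Replaces A's all-pairs double scan over the whole antenna list (with an i>=j / frequency-mismatch guard on every pair) by a one-pass dict bucketing antennas by frequency (recording each antenna's slot in its bucket), after which each antenna is paired only with the later members of its own bucket; asymptotically it does O(n + sum of bucket sizes squared) pair work instead of O(n^2), though a timing run read only 1.27x on the generated inputs.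
import Mathlib
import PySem

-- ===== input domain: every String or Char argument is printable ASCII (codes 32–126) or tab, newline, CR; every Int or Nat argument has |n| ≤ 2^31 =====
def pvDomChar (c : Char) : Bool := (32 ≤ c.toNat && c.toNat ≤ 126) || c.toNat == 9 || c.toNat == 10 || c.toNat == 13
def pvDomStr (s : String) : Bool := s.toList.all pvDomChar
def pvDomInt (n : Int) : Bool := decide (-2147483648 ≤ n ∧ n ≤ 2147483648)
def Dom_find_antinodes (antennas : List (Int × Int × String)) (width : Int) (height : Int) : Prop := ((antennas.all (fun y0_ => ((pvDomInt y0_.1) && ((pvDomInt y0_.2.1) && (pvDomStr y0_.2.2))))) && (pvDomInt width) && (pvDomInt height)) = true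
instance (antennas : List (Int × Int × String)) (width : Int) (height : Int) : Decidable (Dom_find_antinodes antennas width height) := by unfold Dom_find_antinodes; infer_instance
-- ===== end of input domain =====

-- B (alternative algorithm): antennas are bucketed by frequency in one pass, and each antenna
-- is then paired only with the later members of its own bucket — the inner scan over antennas
-- of other frequencies disappears.

-- ===== PORT A =====
def find_antinodes (antennas : List (Int × Int × String)) (width : Int) (height : Int) : List (Int × Int) :=
  (PySem.List.enumerate antennas 0).foldl (fun s ia =>
    (PySem.List.enumerate antennas 0).foldl (fun s ja =>
      if ia.1 ≥ ja.1 ∨ ia.2.2.2 ≠ ja.2.2.2 then s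
      else
        let dx := ja.2.1 - ia.2.1
        let dy := ja.2.2.1 - ia.2.2.1
        let an1 := (ia.2.1 - dx, ia.2.2.1 - dy)
        let an2 := (ja.2.1 + dx, ja.2.2.1 + dy)
        [an1, an2].foldl (fun s p =>
          if 0 ≤ p.1 ∧ p.1 < width ∧ 0 ≤ p.2 ∧ p.2 < height then PySem.Set.add s p else s) s)
      s)
    PySem.Set.empty

-- ===== PORT B =====
-- First loop: 'g = buckets.setdefault(f, []); slots.append((x, y, f, len(g))); g.append((x, y))'.
-- setdefault-then-append mutates the dict entry at f: its net effect on the dict is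
-- Dict.modify f [] (· ++ [(x, y)]), and len(g) reads the entry's length before the append.
def find_antinodes_alt (antennas : List (Int × Int × String)) (width : Int) (height : Int) : List (Int × Int) :=
  let st := antennas.foldl
    (fun (st : PySem.Dict String (List (Int × Int)) × List (Int × Int × String × Int)) a =>
      let g := st.1.getD a.2.2 []
      (st.1.modify a.2.2 [] (fun l => l ++ [(a.1, a.2.1)]),
       st.2 ++ [(a.1, a.2.1, a.2.2, (g.length : Int))]))
    (PySem.Dict.empty, [])
  st.2.foldl (fun out sl =>
    (PySem.List.slice (st.1.getD sl.2.2.1 []) (some (sl.2.2.2 + 1)) none).foldl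
      (fun out c =>
        [(2 * sl.1 - c.1, 2 * sl.2.1 - c.2), (2 * c.1 - sl.1, 2 * c.2 - sl.2.1)].foldl
          (fun out q =>
            if 0 ≤ q.1 ∧ q.1 < width ∧ 0 ≤ q.2 ∧ q.2 < height then PySem.Set.add out q else out)
          out)
      out)
    PySem.Set.empty

-- ===== PRECONDITION & SPEC =====
def Spec_find_antinodes (antennas : List (Int × Int × String)) (width : Int) (height : Int) (out : List (Int × Int)) : Prop := out = find_antinodes_alt antennas width height
instance (antennas : List (Int × Int × String)) (width : Int) (height : Int) (out : List (Int × Int)) : Decidable (Spec_find_antinodes antennas width height out) := by unfold Spec_find_antinodes; infer_instance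

-- ===== CLAIM (what is proved, stated in full; the proofs are below) =====
def Claim_equal_find_antinodes : Prop := ∀ (antennas : List (Int × Int × String)) (width : Int) (height : Int), Dom_find_antinodes antennas width height → Spec_find_antinodes antennas width height (find_antinodes antennas width height)

-- ===== LEMMAS AND PROOFS =====

-- the bounded candidate pair contributed by antenna (x1, y1) and a later bucket member c
def pvCandC (width height x1 y1 : Int) (c : Int × Int) : List (Int × Int) :=
  [(2 * x1 - c.1, 2 * y1 - c.2), (2 * c.1 - x1, 2 * c.2 - y1)].filter
    (fun p => decide (0 ≤ p.1 ∧ p.1 < width ∧ 0 ≤ p.2 ∧ p.2 < height))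

-- the guarded pair contribution of A (empty when frequencies differ)
def pvCand (width height : Int) (a1 a2 : Int × Int × String) : List (Int × Int) :=
  if a1.2.2 = a2.2.2 then pvCandC width height a1.1 a1.2.1 (a2.1, a2.2.1) else []

-- canonical form both programs are reduced to: each antenna against its strict suffix
def pvA (width height : Int) : List (Int × Int × String) → List (Int × Int)
  | [] => []
  | a :: rest => rest.flatMap (pvCand width height a) ++ pvA width height rest

-- B's bucket dict, as a standalone fold
def pvDict (xs : List (Int × Int × String)) : PySem.Dict String (List (Int × Int)) :=
  xs.foldl (fun d a => d.modify a.2.2 [] (fun l => l ++ [(a.1, a.2.1)])) PySem.Dict.empty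

-- B's slots: antenna a at overall position |pref| carries its count of earlier same-frequency antennas
def pvSlots : List (Int × Int × String) → List (Int × Int × String) → List (Int × Int × String × Int)
  | _, [] => []
  | pref, a :: xs =>
      (a.1, a.2.1, a.2.2, ((pref.countP (fun b => b.2.2 == a.2.2)) : Int)) :: pvSlots (pref ++ [a]) xs

-- a fold of folds of Set.add is the fold of Set.add over the flattened candidate list
theorem pv_foldl_add_flat {α β : Type} [BEq α] (f : β → List α) (xs : List β) (s : List α) :
    xs.foldl (fun s b => (f b).foldl PySem.Set.add s) s
      = (xs.flatMap f).foldl PySem.Set.add s := by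
  induction xs generalizing s with
  | nil => rfl
  | cons x xs ih => simp [List.flatMap_cons, List.foldl_append, ih]

theorem pv_flatMap_congr {α β : Type} (xs : List α) (f g : α → List β)
    (h : ∀ x ∈ xs, f x = g x) : xs.flatMap f = xs.flatMap g := by
  induction xs with
  | nil => rfl
  | cons x xs ih => simp_all [List.flatMap_cons]

-- dropping the enumerate entries with index ≤ i is dropping a prefix of the list
theorem pv_enum_guard_flatMap {α β : Type} (xs : List α) (s i : Int) (g : α → List β) :
    (PySem.List.enumerate xs s).flatMap (fun p => if i ≥ p.1 then [] else g p.2)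
      = (xs.drop (i - s + 1).toNat).flatMap g := by
  induction xs generalizing s with
  | nil => simp [PySem.List.enumerate_nil]
  | cons x xs ih =>
    rw [PySem.List.enumerate_cons, List.flatMap_cons, ih]
    by_cases h : i ≥ s
    · have h1 : (i - s + 1).toNat = (i - (s+1) + 1).toNat + 1 := by omega
      simp [h, h1]
    · have h1 : (i - s + 1).toNat = 0 := by omega
      have h2 : (i - (s+1) + 1).toNat = 0 := by omega
      simp [h, h1, h2]

-- A's inner-loop body, per pair, equals folding Set.add over the guarded candidate list
theorem pv_body_eq (width height : Int) (ia ja : Int × (Int × Int × String))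
    (s : List (Int × Int)) :
    (if ia.1 ≥ ja.1 ∨ ia.2.2.2 ≠ ja.2.2.2 then s
     else
       [(ia.2.1 - (ja.2.1 - ia.2.1), ia.2.2.1 - (ja.2.2.1 - ia.2.2.1)),
        (ja.2.1 + (ja.2.1 - ia.2.1), ja.2.2.1 + (ja.2.2.1 - ia.2.2.1))].foldl
         (fun s p =>
           if 0 ≤ p.1 ∧ p.1 < width ∧ 0 ≤ p.2 ∧ p.2 < height then PySem.Set.add s p else s) s)
      = (if ia.1 ≥ ja.1 then [] else pvCand width height ia.2 ja.2).foldl PySem.Set.add s := by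
  by_cases h1 : ia.1 ≥ ja.1
  · simp [h1]
  · by_cases h2 : ia.2.2.2 = ja.2.2.2
    · have e1 : ia.2.1 - (ja.2.1 - ia.2.1) = 2 * ia.2.1 - ja.2.1 := by ring
      have e2 : ia.2.2.1 - (ja.2.2.1 - ia.2.2.1) = 2 * ia.2.2.1 - ja.2.2.1 := by ring
      have e3 : ja.2.1 + (ja.2.1 - ia.2.1) = 2 * ja.2.1 - ia.2.1 := by ring
      have e4 : ja.2.2.1 + (ja.2.2.1 - ia.2.2.1) = 2 * ja.2.2.1 - ia.2.2.1 := by ring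
      rw [e1, e2, e3, e4]
      simp only [pvCand, pvCandC, h1, h2, if_pos, if_neg, not_false_iff]
      rw [List.foldl_filter]
      simp
    · simp [h1, h2, pvCand]

-- A reduces to the canonical suffix form
theorem pv_A_to_pvA (width height : Int) (full pref xs : List (Int × Int × String)) (s : Int)
    (h : full = pref ++ xs) (hs : s = (pref.length : Int)) :
    (PySem.List.enumerate xs s).flatMap
        (fun ka => (full.drop (ka.1 - 0 + 1).toNat).flatMap (pvCand width height ka.2))
      = pvA width height xs := by
  induction xs generalizing pref s with
  | nil => simp [PySem.List.enumerate_nil, pvA]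
  | cons a xs ih =>
    rw [PySem.List.enumerate_cons, List.flatMap_cons, pvA]
    have hd : (s - 0 + 1).toNat = pref.length + 1 := by omega
    have hdrop : full.drop (pref.length + 1) = xs := by
      subst h
      rw [show pref.length + 1 = (pref ++ [a]).length by simp]
      rw [show pref ++ a :: xs = (pref ++ [a]) ++ xs by simp]
      rw [List.drop_left]
    rw [hd, hdrop, ih (pref ++ [a]) (s + 1) (by simp [h]) (by simp [hs])]

-- the final bucket at frequency f holds the coordinates of all f-antennas, in order
theorem pv_dict_getD (xs : List (Int × Int × String)) (f : String) :
    (pvDict xs).getD f [] = (xs.filter (fun a => a.2.2 == f)).map (fun a => (a.1, a.2.1)) := by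
  unfold pvDict
  have hm : xs.foldl (fun (d : PySem.Dict String (List (Int × Int))) a =>
        d.modify a.2.2 [] (fun l => l ++ [(a.1, a.2.1)])) PySem.Dict.empty
      = (xs.map (fun a => (a.2.2, (a.1, a.2.1)))).foldl
          (fun (d : PySem.Dict String (List (Int × Int))) p =>
            d.modify p.1 [] (fun l => l ++ [p.2])) PySem.Dict.empty := by
    rw [List.foldl_map]
  rw [hm, PySem.Dict.getD_foldl_modify_append]
  simp [List.filter_map, Function.comp_def, List.map_map]

-- the building fold, split: dict component and slots component
theorem pv_build (xs pref : List (Int × Int × String)) (s : List (Int × Int × String × Int)) :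
    xs.foldl
      (fun (st : PySem.Dict String (List (Int × Int)) × List (Int × Int × String × Int)) a =>
        (st.1.modify a.2.2 [] (fun l => l ++ [(a.1, a.2.1)]),
         st.2 ++ [(a.1, a.2.1, a.2.2, ((st.1.getD a.2.2 []).length : Int))]))
      (pvDict pref, s)
      = (pvDict (pref ++ xs), s ++ pvSlots pref xs) := by
  induction xs generalizing pref s with
  | nil => simp [pvSlots]
  | cons a xs ih =>
    rw [List.foldl_cons]
    have hg : ((pvDict pref).getD a.2.2 []).length = pref.countP (fun b => b.2.2 == a.2.2) := by
      rw [pv_dict_getD, List.length_map, List.countP_eq_length_filter]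
    have hd : (pvDict pref).modify a.2.2 [] (fun l => l ++ [(a.1, a.2.1)]) = pvDict (pref ++ [a]) := by
      unfold pvDict; rw [List.foldl_append]; rfl
    simp only [hg, hd]
    rw [ih (pref ++ [a]) (s ++ [(a.1, a.2.1, a.2.2, ((pref.countP (fun b => b.2.2 == a.2.2)) : Int))])]
    simp [pvSlots]

-- pairing a head antenna against the filtered suffix is its guarded contribution over the suffix
theorem pv_filter_flat (width height : Int) (a : Int × Int × String)
    (l : List (Int × Int × String)) :
    ((l.filter (fun b => b.2.2 == a.2.2)).map (fun b => (b.1, b.2.1))).flatMap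
        (pvCandC width height a.1 a.2.1)
      = l.flatMap (pvCand width height a) := by
  induction l with
  | nil => rfl
  | cons b l ih =>
    by_cases h : a.2.2 = b.2.2
    · have hb : (b.2.2 == a.2.2) = true := by simp [h]
      simp only [List.filter_cons, hb, if_true, List.map_cons, List.flatMap_cons, ih]
      rw [pvCand, if_pos h]
    · have hb : (b.2.2 == a.2.2) = false := by simp [Ne.symm h]
      simp [hb, pvCand, h, ih]

-- B reduces to the canonical suffix form
theorem pv_B_to_pvA (width height : Int) (full pref xs : List (Int × Int × String))
    (h : full = pref ++ xs) :
    (pvSlots pref xs).flatMap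
        (fun sl => (PySem.List.slice ((pvDict full).getD sl.2.2.1 []) (some (sl.2.2.2 + 1)) none).flatMap
          (pvCandC width height sl.1 sl.2.1))
      = pvA width height xs := by
  induction xs generalizing pref with
  | nil => simp [pvSlots, pvA]
  | cons a xs ih =>
    rw [pvSlots, List.flatMap_cons, pvA]
    have hslice :
        PySem.List.slice ((pvDict full).getD a.2.2 [])
            (some (((pref.countP (fun b => b.2.2 == a.2.2)) : Int) + 1)) none
          = (xs.filter (fun b => b.2.2 == a.2.2)).map (fun b => (b.1, b.2.1)) := by
      have hc : ((pref.countP (fun b => b.2.2 == a.2.2)) : Int) + 1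
          = ((pref.countP (fun b => b.2.2 == a.2.2) + 1 : Nat) : Int) := by push_cast; ring
      rw [hc, PySem.List.slice_from_natCast, pv_dict_getD, h]
      rw [show pref ++ a :: xs = (pref ++ [a]) ++ xs by simp]
      rw [List.filter_append, List.map_append]
      have hlen : (((pref ++ [a]).filter (fun b => b.2.2 == a.2.2)).map (fun b => (b.1, b.2.1))).length
          = pref.countP (fun b => b.2.2 == a.2.2) + 1 := by
        simp [List.countP_eq_length_filter, List.filter_append]
      rw [← hlen, List.drop_left]
    rw [hslice, pv_filter_flat, ih (pref ++ [a]) (by simp [h])]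

-- ===== VERDICT (by name: the statement is the Claim_ definition above) =====
theorem find_antinodes_spec : Claim_equal_find_antinodes := by
  intro antennas width height _
  unfold Spec_find_antinodes find_antinodes find_antinodes_alt
  -- normalize A
  simp only [pv_body_eq, pv_foldl_add_flat]
  have hA : ∀ ia ∈ PySem.List.enumerate antennas 0,
      (PySem.List.enumerate antennas 0).flatMap
          (fun ja => if ia.1 ≥ ja.1 then [] else pvCand width height ia.2 ja.2)
        = (antennas.drop (ia.1 - 0 + 1).toNat).flatMap (pvCand width height ia.2) := by
    intro ia _; exact pv_enum_guard_flatMap antennas 0 ia.1 _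
  rw [pv_flatMap_congr _ _ _ hA,
    pv_A_to_pvA width height antennas [] antennas 0 rfl rfl]
  -- normalize B
  rw [show (PySem.Dict.empty : PySem.Dict String (List (Int × Int))) = pvDict [] from rfl,
    pv_build antennas [] []]
  simp only [List.nil_append]
  have houter : (fun (out : List (Int × Int)) (sl : Int × Int × String × Int) =>
      (PySem.List.slice ((pvDict antennas).getD sl.2.2.1 []) (some (sl.2.2.2 + 1)) none).foldl
        (fun out c =>
          [(2 * sl.1 - c.1, 2 * sl.2.1 - c.2), (2 * c.1 - sl.1, 2 * c.2 - sl.2.1)].foldl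
            (fun out q =>
              if 0 ≤ q.1 ∧ q.1 < width ∧ 0 ≤ q.2 ∧ q.2 < height then PySem.Set.add out q else out)
            out)
        out)
      = (fun out sl =>
        ((PySem.List.slice ((pvDict antennas).getD sl.2.2.1 []) (some (sl.2.2.2 + 1)) none).flatMap
          (pvCandC width height sl.1 sl.2.1)).foldl PySem.Set.add out) := by
    funext out sl
    rw [← pv_foldl_add_flat]
    congr 1
    funext out' c
    rw [pvCandC, List.foldl_filter]
    simp
  rw [houter, pv_foldl_add_flat, pv_B_to_pvA width height antennas [] antennas rfl]
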